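-- pv_equiv track=rewrite | github.com/MirindraRandrianarijaona/Nero-team-codingame | nbInvOuOpp.py | nb
-- ===== SOURCE A (Python) =====
-- def nb(T):
--     count = 0
--     n = len(T)
--
--     for i in range(n):
--         for j in range(i+1, n):
--             if (T[i] + T[j] == 0) or (T[i] * T[j] == 1):
--                 count += 1
--
--     return count
--
-- T = [1, 2, -1, -2, 0, 3]
-- ===== SOURCE B (Python) =====
-- def nb(T):
--     count = 0
--     seen = {}
--     for x in T:
--         count += seen.get(-x, 0)
--         if x == 1 or x == -1:
--             count += seen.get(x, 0)
--         seen[x] = seen.get(x, 0) + 1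
--     return count
-- ===== Notes on version B (the rewrite author's own statement) =====
-- stated objective: faster
-- what changed: Replaced the quadratic all-pairs double loop by a single pass that keeps a hash map of value frequencies: for each element it adds the number of earlier opposites (sum zero) and, when the element is 1 or -1, the number of earlier equal elements (product one).
import Mathlib
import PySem

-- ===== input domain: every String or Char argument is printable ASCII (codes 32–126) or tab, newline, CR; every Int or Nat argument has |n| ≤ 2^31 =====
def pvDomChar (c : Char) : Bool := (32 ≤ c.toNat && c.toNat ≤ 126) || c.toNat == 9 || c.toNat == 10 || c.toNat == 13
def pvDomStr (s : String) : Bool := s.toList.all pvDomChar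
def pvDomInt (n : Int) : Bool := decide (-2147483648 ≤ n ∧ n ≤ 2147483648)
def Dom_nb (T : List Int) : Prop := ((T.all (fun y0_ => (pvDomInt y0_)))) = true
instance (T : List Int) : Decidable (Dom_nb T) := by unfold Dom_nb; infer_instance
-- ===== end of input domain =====

-- B replaces A's quadratic all-pairs double loop by one pass over a frequency dictionary (faster, asymptotic).

-- ===== PORT A =====
def nb (T : List Int) : Int :=
  let n : Int := (T.length : Int)
  (PySem.List.pyRange 0 n 1).foldl (fun count i =>
    (PySem.List.pyRange (i + 1) n 1).foldl (fun count j =>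
      if PySem.List.pyGetD T i 0 + PySem.List.pyGetD T j 0 = 0 ∨
         PySem.List.pyGetD T i 0 * PySem.List.pyGetD T j 0 = 1 then count + 1 else count)
      count) 0

-- ===== PORT B =====
def nb_alt (T : List Int) : Int :=
  (T.foldl (fun (s : Int × PySem.Dict Int Int) x =>
      let count := s.1 + s.2.getD (-x) 0
      let count := if x = 1 ∨ x = -1 then count + s.2.getD x 0 else count
      (count, s.2.insert x (s.2.getD x 0 + 1)))
    (0, PySem.Dict.empty)).1

-- ===== PRECONDITION & SPEC =====
def Spec_nb (T : List Int) (out : Int) : Prop := out = nb_alt T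
instance (T : List Int) (out : Int) : Decidable (Spec_nb T out) := by unfold Spec_nb; infer_instance

-- ===== CLAIM (what is proved, stated in full; the proofs are below) =====
def Claim_equal_nb : Prop := ∀ (T : List Int), Dom_nb T → Spec_nb T (nb T)

-- ===== LEMMAS AND PROOFS =====

-- the pair test, as a Bool predicate
def pvPb (x y : Int) : Bool := decide (x + y = 0 ∨ x * y = 1)

-- A's result: sum over each element of its matches among the later elements
def pvF : List Int → Int
  | [] => 0
  | x :: R => (R.countP (fun y => pvPb x y) : Int) + pvF R

-- B's per-element addend and accumulated result, with L the list of already-seen elements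
def pvG (L : List Int) : List Int → Int
  | [] => 0
  | x :: T => (L.count (-x) : Int) + (if x = 1 ∨ x = -1 then (L.count x : Int) else 0)
              + pvG (L ++ [x]) T

lemma pvCount_lemma (x : Int) (L : List Int) :
    (L.countP (fun y => pvPb y x) : Int)
      = (L.count (-x) : Int) + (if x = 1 ∨ x = -1 then (L.count x : Int) else 0) := by
  by_cases hx : x = 1 ∨ x = -1
  · rw [if_pos hx]
    induction L with
    | nil => simp
    | cons y L ih =>
      have hne : -x ≠ x := by rcases hx with h | h <;> subst h <;> decide
      simp only [List.countP_cons, List.count_cons]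
      push_cast
      rw [ih]
      by_cases h1 : y = -x
      · subst h1
        have hp : pvPb (-x) x = true := by simp [pvPb]
        simp [hp, hne]
        omega
      · by_cases h2 : y = x
        · subst h2
          have hp : pvPb y y = true := by rcases hx with h | h <;> subst h <;> decide
          simp [hp, h1]
          omega
        · have hp : pvPb y x = false := by
            simp only [pvPb, decide_eq_false_iff_not]
            rintro (h | h)
            · exact h1 (by omega)
            · rcases Int.mul_eq_one_iff_eq_one_or_neg_one.mp h with ⟨hy, hxx⟩ | ⟨hy, hxx⟩ <;>
                exact h2 (by omega)
          simp [hp, h1, h2]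
  · rw [if_neg hx]
    push Not at hx
    induction L with
    | nil => simp
    | cons y L ih =>
      simp only [List.countP_cons, List.count_cons]
      push_cast
      rw [ih]
      by_cases h1 : y = -x
      · subst h1
        have hp : pvPb (-x) x = true := by simp [pvPb]
        simp [hp]
      · have hp : pvPb y x = false := by
          simp only [pvPb, decide_eq_false_iff_not]
          rintro (h | h)
          · exact h1 (by omega)
          · rcases Int.mul_eq_one_iff_eq_one_or_neg_one.mp h with ⟨hy, hxx⟩ | ⟨hy, hxx⟩ <;>
              simp_all
        simp [hp, h1]

-- ===== A side =====

lemma pvInner (T : List Int) (x init : Int) (k : Nat) :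
    (PySem.List.pyRange ((k : Int) + 1) (T.length : Int) 1).foldl
        (fun c j => if x + PySem.List.pyGetD T j 0 = 0 ∨ x * PySem.List.pyGetD T j 0 = 1
                    then c + 1 else c) init
      = init + ((T.drop (k + 1)).countP (fun y => pvPb x y) : Int) := by
  have h0 : (0 : Int) ≤ (k : Int) + 1 := by positivity
  have := PySem.List.foldl_pyRange_pyGetD (xs := T) (a := (k : Int) + 1) (d := 0)
    (f := fun c y => if x + y = 0 ∨ x * y = 1 then c + 1 else c) (init := init) h0
  simp only [PySem.List.len] at this
  rw [this]
  have ht : ((k : Int) + 1).toNat = k + 1 := by omega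
  rw [ht, PySem.List.foldl_ite_add_one]
  congr 1

lemma pvOuter (T : List Int) : ∀ (m k : Nat) (init : Int), T.length - k = m →
    (PySem.List.pyRange (k : Int) (T.length : Int) 1).foldl (fun count i =>
      (PySem.List.pyRange (i + 1) (T.length : Int) 1).foldl (fun c j =>
        if PySem.List.pyGetD T i 0 + PySem.List.pyGetD T j 0 = 0 ∨
           PySem.List.pyGetD T i 0 * PySem.List.pyGetD T j 0 = 1 then c + 1 else c)
        count) init
      = init + pvF (T.drop k) := by
  intro m
  induction m with
  | zero =>
    intro k init hm
    have hk : T.length ≤ k := by omega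
    rw [PySem.List.pyRange_one_eq_nil (by exact_mod_cast hk)]
    simp [List.drop_eq_nil_of_le hk, pvF]
  | succ m ih =>
    intro k init hm
    have hk : k < T.length := by omega
    rw [PySem.List.pyRange_one_cons (by exact_mod_cast hk)]
    rw [List.foldl_cons]
    have hx : PySem.List.pyGetD T (k : Int) 0 = T[k] := by
      simp [PySem.List.pyGetD_natCast, List.getD_eq_getElem?_getD, List.getElem?_eq_getElem hk]
    rw [hx, pvInner T (T[k]) init k]
    have hcast : ((k : Int) + 1) = ((k + 1 : Nat) : Int) := by push_cast; ring
    rw [hcast, ih (k + 1) _ (by omega)]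
    have hdrop : T.drop k = T[k] :: T.drop (k + 1) := List.drop_eq_getElem_cons hk
    rw [hdrop]
    simp [pvF]; ring

lemma pvA_eq_F (T : List Int) : nb T = pvF T := by
  unfold nb
  have := pvOuter T T.length 0 0 (by omega)
  simpa using this

-- ===== B side =====

lemma pvB_inv (T : List Int) : ∀ (L : List Int) (c : Int) (d : PySem.Dict Int Int),
    (∀ v, d.getD v 0 = (L.count v : Int)) →
    (T.foldl (fun (s : Int × PySem.Dict Int Int) x =>
        let count := s.1 + s.2.getD (-x) 0
        let count := if x = 1 ∨ x = -1 then count + s.2.getD x 0 else count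
        (count, s.2.insert x (s.2.getD x 0 + 1))) (c, d)).1
      = c + pvG L T := by
  induction T with
  | nil => intro L c d h; simp [pvG]
  | cons x T ih =>
    intro L c d h
    rw [List.foldl_cons]
    have hnew : ∀ v, (d.insert x (d.getD x 0 + 1)).getD v 0 = ((L ++ [x]).count v : Int) := by
      intro v
      rw [PySem.Dict.getD_insert]
      by_cases hv : v = x
      · subst hv; simp [h, List.count_append]
      · rw [if_neg hv, h v]
        have hz : List.count v [x] = 0 := by
          rw [List.count_eq_zero]
          simp [hv]
        simp [List.count_append, hz]
    simp only []
    rw [ih (L ++ [x]) _ _ hnew]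
    simp only [pvG, h]
    by_cases hx : x = 1 ∨ x = -1 <;> simp [hx] <;> ring

lemma pvB_eq_G (T : List Int) : nb_alt T = pvG [] T := by
  unfold nb_alt
  rw [pvB_inv T [] 0 PySem.Dict.empty (by intro v; simp [PySem.Dict.getD_empty])]
  simp

-- ===== bridging F and G =====

lemma pvG_eq (T : List Int) : ∀ L,
    pvG L T = pvF T + (T.map (fun t => (L.countP (fun y => pvPb y t) : Int))).sum := by
  induction T with
  | nil => intro L; simp [pvG, pvF]
  | cons x T ih =>
    intro L
    simp only [pvG, pvF, List.map_cons, List.sum_cons]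
    rw [ih (L ++ [x])]
    have hm : (L.count (-x) : Int) + (if x = 1 ∨ x = -1 then (L.count x : Int) else 0)
        = (L.countP (fun y => pvPb y x) : Int) := (pvCount_lemma x L).symm
    have happ : ∀ t : Int, ((L ++ [x]).countP (fun y => pvPb y t) : Int)
        = (L.countP (fun y => pvPb y t) : Int) + (if pvPb x t then 1 else 0) := by
      intro t; rw [List.countP_append]; push_cast; simp [List.countP_cons]
    have hsum : (T.map (fun t => ((L ++ [x]).countP (fun y => pvPb y t) : Int))).sum
        = (T.map (fun t => (L.countP (fun y => pvPb y t) : Int))).sum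
          + (T.map (fun t => if pvPb x t then (1 : Int) else 0)).sum := by
      simp only [happ]
      exact PySem.List.sum_map_add_int T _ _
    rw [hsum]
    have hcnt : (T.map (fun t => if pvPb x t then (1 : Int) else 0)).sum
        = (T.countP (fun y => pvPb x y) : Int) := PySem.List.sum_map_ite_one_zero _ T
    rw [hcnt, hm]
    ring

-- ===== VERDICT (by name: the statement is the Claim_ definition above) =====
theorem nb_spec : Claim_equal_nb := by
  intro T _
  unfold Spec_nb
  rw [pvA_eq_F, pvB_eq_G, pvG_eq T []]
  simp
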